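-- pv_equiv track=rewrite | github.com/kei-dongjin-kim/coding-test-python | src/P3498.py | reverseDegree
-- ===== SOURCE A (Python) =====
-- def reverseDegree(s: str) -> int:
--   res = 0
--   index = 1
--   for c in s:
--     # Calculate the postion of the character
--     # 0 for 'a', 25 for 'z'
--     val = ord(c) - ord('a')
--     # Add the weighted reversed value (26 - val) * index
--     res += (26 - val) * index
--     index += 1
--   return res
-- ===== SOURCE B (Python) =====
-- def reverseDegree(s: str) -> int:
--   n = len(s)
--   return 13 * n * (n + 1) - sum((ord(c) - 97) * (i + 1) for i, c in enumerate(s))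
-- ===== Notes on version B (the rewrite author's own statement) =====
-- stated objective: alternative
-- what changed: Splits the sum algebraically: the constant 26-weighted triangular part becomes the closed form 13*n*(n+1), and only the character-value-weighted part is accumulated in a single enumerate pass, instead of accumulating (26-val)*index with a hand-maintained index counter.
import Mathlib
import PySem

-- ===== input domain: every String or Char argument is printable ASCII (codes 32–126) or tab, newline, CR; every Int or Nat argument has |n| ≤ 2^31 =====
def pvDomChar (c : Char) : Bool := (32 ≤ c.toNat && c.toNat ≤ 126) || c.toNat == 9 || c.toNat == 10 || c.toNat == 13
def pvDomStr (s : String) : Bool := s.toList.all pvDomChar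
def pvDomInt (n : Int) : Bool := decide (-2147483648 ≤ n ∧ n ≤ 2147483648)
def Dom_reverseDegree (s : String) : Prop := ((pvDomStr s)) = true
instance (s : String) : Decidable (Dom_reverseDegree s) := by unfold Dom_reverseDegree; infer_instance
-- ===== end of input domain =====

-- B computes the same value via the algebraic split 13*n*(n+1) minus a single
-- value-weighted enumerate pass, instead of A's per-character (26-val)*index accumulation.


-- ===== PORT A =====
-- literal port of A: fold over the characters carrying (res, index), res += (26 - val) * index
def reverseDegree (s : String) : Int :=
  (s.toList.foldl
    (fun (st : Int × Int) (c : Char) =>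
      (st.1 + (26 - ((c.toNat : Int) - 97)) * st.2, st.2 + 1))
    (0, 1)).1

-- ===== PORT B =====
-- literal port of B: 13*n*(n+1) minus the sum of (ord(c)-97)*(i+1) over enumerate(s)
def reverseDegree_alt (s : String) : Int :=
  let n : Int := (s.toList.length : Int)
  13 * n * (n + 1) -
    (PySem.List.enumerate s.toList 0).foldl
      (fun (acc : Int) (p : Int × Char) => acc + ((p.2.toNat : Int) - 97) * (p.1 + 1)) 0

-- ===== PRECONDITION & SPEC =====
def Spec_reverseDegree (s : String) (out : Int) : Prop := out = reverseDegree_alt s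
instance (s : String) (out : Int) : Decidable (Spec_reverseDegree s out) := by unfold Spec_reverseDegree; infer_instance

-- ===== CLAIM (what is proved, stated in full; the proofs are below) =====
def Claim_equal_reverseDegree : Prop := ∀ (s : String), Dom_reverseDegree s → Spec_reverseDegree s (reverseDegree s)

-- ===== LEMMAS AND PROOFS =====

-- the value-weighted sum with weights k+1, k+2, …
def pvWsum (l : List Char) (k : Int) : Int :=
  match l with
  | [] => 0
  | c :: t => ((c.toNat : Int) - 97) * (k + 1) + pvWsum t (k + 1)

-- the index sum k + (k+1) + … over l's positions
def pvTri (l : List Char) (k : Int) : Int :=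
  match l with
  | [] => 0
  | _ :: t => k + pvTri t (k + 1)

theorem pvFoldA (l : List Char) (res k : Int) :
    (l.foldl (fun (st : Int × Int) (c : Char) =>
        (st.1 + (26 - ((c.toNat : Int) - 97)) * st.2, st.2 + 1)) (res, k)).1
      = res + 26 * pvTri l k - pvWsum l (k - 1) := by
  induction l generalizing res k with
  | nil => simp [pvTri, pvWsum]
  | cons c t ih =>
    simp only [List.foldl, pvTri, pvWsum, ih]
    ring_nf

theorem pvFoldB (l : List Char) (k : Int) (acc : Int) :
    (PySem.List.enumerate l k).foldl
      (fun (acc : Int) (p : Int × Char) => acc + ((p.2.toNat : Int) - 97) * (p.1 + 1)) acc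
      = acc + pvWsum l k := by
  induction l generalizing k acc with
  | nil => simp [PySem.List.enumerate_nil, pvWsum]
  | cons c t ih =>
    simp only [PySem.List.enumerate_cons, List.foldl, pvWsum, ih]
    ring

theorem pvTri_closed (l : List Char) (k : Int) :
    2 * pvTri l k = (l.length : Int) * (2 * k + (l.length : Int) - 1) := by
  induction l generalizing k with
  | nil => simp [pvTri]
  | cons c t ih =>
    simp only [pvTri, List.length_cons]
    push_cast
    have := ih (k + 1)
    linarith [ih (k + 1)]

-- ===== VERDICT (by name: the statement is the Claim_ definition above) =====
theorem reverseDegree_spec : Claim_equal_reverseDegree := by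
  intro s _
  unfold Spec_reverseDegree reverseDegree reverseDegree_alt
  rw [pvFoldA, pvFoldB]
  have h := pvTri_closed s.toList 1
  set n : Int := (s.toList.length : Int)
  norm_num
  linarith
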